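-- pv_equiv track=rewrite | github.com/RideGreg/LintCode | Python/count-the-repetitions.py | getMaxRepetitions_bruteforce
-- ===== SOURCE A (Python) =====
-- def getMaxRepetitions_bruteforce(s1, n1, s2, n2):
--     if n1 == n2:
--         n1, n2 = 1, 1
--     l1, l2 = len(s1), len(s2)
--     i, j, ans = 0, 0, 0
--     while i < l1*n1 and j < l2*n2:
--         if s1[i%l1] == s2[j%l2]:
--             j += 1
--             if j == l2 * n2:
--                 ans += 1
--                 j = 0
--         i += 1
--     return ans
-- ===== SOURCE B (Python) =====
-- def getMaxRepetitions_bruteforce(s1, n1, s2, n2):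
--     if n1 == n2:
--         n1, n2 = 1, 1
--     if n1 <= 0 or n2 <= 0 or not s1 or not s2:
--         return 0
--     l2 = len(s2)
--
--     def step(j):
--         # run one copy of s1 from s2-index j; return (new index, matches made)
--         m = 0
--         for c in s1:
--             if c == s2[j]:
--                 j += 1
--                 m += 1
--                 if j == l2:
--                     j = 0
--         return j, m
--
--     seen = {}  # s2-index at the start of a copy -> (copy number, matches so far)
--     j, total, k = 0, 0, 0
--     while k < n1 and j not in seen:
--         seen[j] = (k, total)
--         j, m = step(j)
--         total += m
--         k += 1
--     if k < n1:
--         k0, t0 = seen[j]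
--         cycle_len = k - k0
--         cycle_m = total - t0
--         q = (n1 - k) // cycle_len
--         total += q * cycle_m
--         k += q * cycle_len
--         for _ in range(n1 - k):
--             j, m = step(j)
--             total += m
--     return total // (l2 * n2)
-- ===== Notes on version B (the rewrite author's own statement) =====
-- stated objective: faster
-- what changed: A walks s1 repeated n1 times character by character (O(len(s1)*n1)); B runs one pass of s1 per starting s2-index, detects the first repeated index state across copies of s1, skips all full cycles arithmetically, and divides the total match count by len(s2)*n2.
import Mathlib
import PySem

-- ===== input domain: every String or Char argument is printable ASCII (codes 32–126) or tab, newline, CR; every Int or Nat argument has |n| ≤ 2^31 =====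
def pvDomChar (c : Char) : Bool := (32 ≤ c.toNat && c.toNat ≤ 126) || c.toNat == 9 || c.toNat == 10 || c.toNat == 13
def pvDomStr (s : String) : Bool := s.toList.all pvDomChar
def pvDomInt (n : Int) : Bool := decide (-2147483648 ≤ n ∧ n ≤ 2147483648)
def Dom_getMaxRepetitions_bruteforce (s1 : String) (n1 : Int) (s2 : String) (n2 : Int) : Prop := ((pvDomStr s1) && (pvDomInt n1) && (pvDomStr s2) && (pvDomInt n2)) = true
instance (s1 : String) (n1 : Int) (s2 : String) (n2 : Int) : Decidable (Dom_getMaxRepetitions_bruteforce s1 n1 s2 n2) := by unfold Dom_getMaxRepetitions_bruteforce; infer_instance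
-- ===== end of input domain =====

-- B replaces A's character-by-character walk over s1 repeated n1 times by one pass of s1 per s2-state
-- with cycle detection and arithmetic over the detected cycle (objective: faster).

-- ===== PORT A =====
-- the while loop of A: state (i, j, ans); Python's `while i < l1*n1 and j < l2*n2`
def pvLoopA (c1 c2 : List Char) (l1 l2 n1 n2 : Int) (i j ans : Int) : Int :=
  if h : i < l1 * n1 ∧ j < l2 * n2 then
    let ja : Int × Int :=
      match PySem.List.pyGet? c1 (PySem.Int.mod i l1), PySem.List.pyGet? c2 (PySem.Int.mod j l2) with
      | some a, some b =>
          if a == b then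
            (if j + 1 == l2 * n2 then ((0 : Int), ans + 1) else (j + 1, ans))
          else (j, ans)
      | _, _ => (j, ans)   -- unreachable from the entry state (i = j = 0): Python would raise
    pvLoopA c1 c2 l1 l2 n1 n2 (i + 1) ja.1 ja.2
  else ans
termination_by (l1 * n1 - i).toNat
decreasing_by omega

def getMaxRepetitions_bruteforce (s1 : String) (n1 : Int) (s2 : String) (n2 : Int) : Int :=
  let p : Int × Int := if n1 == n2 then (1, 1) else (n1, n2)
  pvLoopA s1.toList s2.toList (PySem.Str.len s1) (PySem.Str.len s2) p.1 p.2 0 0 0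

-- ===== PORT B =====
-- step(j): run one copy of s1 from s2-index j, return (new index, matches made)
def pvStepB (c1 c2 : List Char) (l2 : Int) (j : Int) : Int × Int :=
  c1.foldl
    (fun (jm : Int × Int) c =>
      match PySem.List.pyGet? c2 jm.1 with
      | some ch =>
          if c == ch then
            (if jm.1 + 1 == l2 then ((0 : Int), jm.2 + 1) else (jm.1 + 1, jm.2 + 1))
          else jm
      | none => jm)   -- unreachable (j stays in [0, l2)): Python would raise
    (j, 0)

-- the `while k < n1 and j not in seen` loop; returns the final (seen, j, total, k)
def pvWalkB (c1 c2 : List Char) (l2 n1 : Int) (seen : PySem.Dict Int (Int × Int))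
    (j total k : Int) : PySem.Dict Int (Int × Int) × Int × Int × Int :=
  if h : k < n1 ∧ seen.contains j = false then
    let sm := pvStepB c1 c2 l2 j
    pvWalkB c1 c2 l2 n1 (seen.insert j (k, total)) sm.1 (total + sm.2) (k + 1)
  else (seen, j, total, k)
termination_by (n1 - k).toNat
decreasing_by omega

-- everything after the early-return guard of Source B
def pvAltCore (c1 c2 : List Char) (l2 n1 n2 : Int) : Int :=
  let w := pvWalkB c1 c2 l2 n1 .empty 0 0 0
  let seen := w.1
  let j := w.2.1
  let total := w.2.2.1
  let k := w.2.2.2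
  let total' : Int :=
    if k < n1 then
      match seen.get? j with
      | some kt =>
          let cycleLen := k - kt.1
          let cycleM := total - kt.2
          let q := PySem.Int.floordiv (n1 - k) cycleLen
          let k1 := k + q * cycleLen
          ((PySem.List.pyRange 0 (n1 - k1) 1).foldl
            (fun (jt : Int × Int) _ =>
              let sm := pvStepB c1 c2 l2 jt.1
              (sm.1, jt.2 + sm.2))
            (j, total + q * cycleM)).2
      | none => total   -- unreachable: the loop only stops early when j is a seen key
    else total
  PySem.Int.floordiv total' (l2 * n2)

def getMaxRepetitions_bruteforce_alt (s1 : String) (n1 : Int) (s2 : String) (n2 : Int) : Int :=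
  let p : Int × Int := if n1 == n2 then (1, 1) else (n1, n2)
  if p.1 ≤ 0 ∨ p.2 ≤ 0 ∨ s1.toList = [] ∨ s2.toList = [] then 0
  else pvAltCore s1.toList s2.toList (PySem.Str.len s2) p.1 p.2

-- ===== PRECONDITION & SPEC =====
def Spec_getMaxRepetitions_bruteforce (s1 : String) (n1 : Int) (s2 : String) (n2 : Int) (out : Int) : Prop := out = getMaxRepetitions_bruteforce_alt s1 n1 s2 n2
instance (s1 : String) (n1 : Int) (s2 : String) (n2 : Int) (out : Int) : Decidable (Spec_getMaxRepetitions_bruteforce s1 n1 s2 n2 out) := by unfold Spec_getMaxRepetitions_bruteforce; infer_instance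

-- ===== CLAIM (what is proved, stated in full; the proofs are below) =====
def Claim_equal_getMaxRepetitions_bruteforce : Prop := ∀ (s1 : String) (n1 : Int) (s2 : String) (n2 : Int), Dom_getMaxRepetitions_bruteforce s1 n1 s2 n2 → Spec_getMaxRepetitions_bruteforce s1 n1 s2 n2 (getMaxRepetitions_bruteforce s1 n1 s2 n2)

-- ===== LEMMAS AND PROOFS =====

-- reference semantics: total number of greedy matches of the cyclic stream of c2
-- against a character list, starting with M matches already made
def pvScan (c2 cs : List Char) (M : Nat) : Nat :=
  match cs with
  | [] => M
  | c :: rest => pvScan c2 rest (if c == c2.getD (M % c2.length) c then M + 1 else M)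

def pvIter (c2 c1 : List Char) : Nat → Nat → Nat
  | 0, M => M
  | n + 1, M => pvIter c2 c1 n (pvScan c2 c1 M)

def pvT (c2 c1 : List Char) (k : Nat) : Nat := pvIter c2 c1 k 0

def pvU (c2 c1 : List Char) (k : Nat) : Nat := pvT c2 c1 k % c2.length

def pvF (c2 c1 : List Char) (j : Nat) : Nat := pvScan c2 c1 j % c2.length

-- the dict built by the first k iterations of B's while loop
def pvSeen (c2 c1 : List Char) : Nat → PySem.Dict Int (Int × Int)
  | 0 => .empty
  | k + 1 => (pvSeen c2 c1 k).insert (pvU c2 c1 k) (k, pvT c2 c1 k)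

theorem pvIter_succ_right (c2 c1 : List Char) (n M : Nat) :
    pvIter c2 c1 (n + 1) M = pvScan c2 c1 (pvIter c2 c1 n M) := by
  induction n generalizing M with
  | zero => rfl
  | succ n ih => rw [pvIter]; rw [ih]; rfl

theorem pvScan_shift (c2 cs : List Char) (M t : Nat) :
    pvScan c2 cs (M + c2.length * t) = pvScan c2 cs M + c2.length * t := by
  induction cs generalizing M with
  | nil => rfl
  | cons c rest ih =>
    simp only [pvScan, Nat.add_mul_mod_self_left]
    split
    · rw [show M + c2.length * t + 1 = (M + 1) + c2.length * t by omega, ih]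
    · exact ih M

theorem pvT_succ (c2 c1 : List Char) (k : Nat) :
    pvT c2 c1 (k + 1) = pvScan c2 c1 (pvT c2 c1 k) := pvIter_succ_right c2 c1 k 0

-- scan from T k splits into scan from u k plus the multiple of l2 already inside T k
theorem pvScan_T (c2 c1 : List Char) (k : Nat) :
    pvScan c2 c1 (pvT c2 c1 k) =
      pvScan c2 c1 (pvU c2 c1 k) + c2.length * (pvT c2 c1 k / c2.length) := by
  have h := pvScan_shift c2 c1 (pvU c2 c1 k) (pvT c2 c1 k / c2.length)
  rw [pvU, Nat.mod_add_div] at h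
  rw [h, pvU]

theorem pvU_succ (c2 c1 : List Char) (k : Nat) :
    pvU c2 c1 (k + 1) = pvF c2 c1 (pvU c2 c1 k) := by
  rw [pvU, pvT_succ, pvScan_T, Nat.add_mul_mod_self_left, pvF]

theorem pvU_iterate (c2 c1 : List Char) (k : Nat) :
    pvU c2 c1 k = (pvF c2 c1)^[k] 0 := by
  induction k with
  | zero => rfl
  | succ k ih => rw [pvU_succ, ih, Function.iterate_succ_apply']

theorem pvT_succ_int (c2 c1 : List Char) (k : Nat) :
    (pvT c2 c1 (k + 1) : Int) =
      pvT c2 c1 k + ((pvScan c2 c1 (pvU c2 c1 k) : Int) - pvU c2 c1 k) := by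
  have h1 := pvT_succ c2 c1 k
  have h2 := pvScan_T c2 c1 k
  have h3 : pvU c2 c1 k + c2.length * (pvT c2 c1 k / c2.length) = pvT c2 c1 k :=
    Nat.mod_add_div _ _
  have h3' : ((pvT c2 c1 k % c2.length : Nat) : Int) + (c2.length : Int) * ((pvT c2 c1 k / c2.length : Nat) : Int) = (pvT c2 c1 k : Int) := by
    have := Nat.mod_add_div (pvT c2 c1 k) c2.length
    push_cast
    exact_mod_cast this
  rw [h1, h2]
  push_cast
  rw [pvU] at *
  push_cast at h3'
  omega

-- mod/div of M+1 in terms of mod/div of M (variable divisor, so omega alone cannot)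
theorem pvMod_succ_full {a b : Nat} (h : a % b + 1 = b) : (a + 1) % b = 0 := by
  have h0 := Nat.div_add_mod a b
  have h1 : a + 1 = b * (a / b) + b * 1 := by omega
  rw [h1, ← Nat.mul_add b, Nat.mul_mod_right]

theorem pvMod_succ_lt {a b : Nat} (h : a % b + 1 < b) : (a + 1) % b = a % b + 1 := by
  have h0 := Nat.div_add_mod a b
  have h1 : a + 1 = b * (a / b) + (a % b + 1) := by omega
  rw [h1, Nat.mul_add_mod, Nat.mod_eq_of_lt h]

theorem pvDiv_succ_full {a b : Nat} (h : a % b + 1 = b) : (a + 1) / b = a / b + 1 := by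
  have h0 := Nat.div_add_mod a b
  have hb : 0 < b := by omega
  have h1 : a + 1 = b * (a / b) + b := by omega
  rw [h1, Nat.mul_add_div hb, Nat.div_self hb]

theorem pvDiv_succ_lt {a b : Nat} (h : a % b + 1 < b) : (a + 1) / b = a / b := by
  have h0 := Nat.div_add_mod a b
  have hb : 0 < b := by omega
  have h1 : a + 1 = b * (a / b) + (a % b + 1) := by omega
  rw [h1, Nat.mul_add_div hb, Nat.div_eq_of_lt h, Nat.add_zero]

-- ===== B-side: the fold of step(j) =====
theorem pvStepB_fold (c2 : List Char) (h2 : c2 ≠ []) (cs : List Char) (M : Nat) (m0 : Int) :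
    cs.foldl
      (fun (jm : Int × Int) c =>
        match PySem.List.pyGet? c2 jm.1 with
        | some ch =>
            if c == ch then
              (if jm.1 + 1 == (c2.length : Int) then ((0 : Int), jm.2 + 1) else (jm.1 + 1, jm.2 + 1))
            else jm
        | none => jm)
      (((M % c2.length : Nat) : Int), m0)
    = (((pvScan c2 cs M % c2.length : Nat) : Int), m0 + ((pvScan c2 cs M : Int) - M)) := by
  have hl2 : 0 < c2.length := List.length_pos_of_ne_nil h2
  induction cs generalizing M m0 with
  | nil => simp [pvScan]
  | cons c rest ih =>
    have hm : M % c2.length < c2.length := Nat.mod_lt _ hl2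
    have hget : PySem.List.pyGet? c2 ((M % c2.length : Nat) : Int) = some c2[M % c2.length] := by
      rw [PySem.List.pyGet?_natCast, List.getElem?_eq_getElem hm]
    simp only [List.foldl_cons, hget, pvScan, List.getD_eq_getElem c2 _ hm]
    by_cases hc : c == c2[M % c2.length]
    · simp only [hc, if_true]
      by_cases hw : M % c2.length + 1 = c2.length
      · have hbeq : (((M % c2.length : Nat) : Int) + 1 == (c2.length : Int)) = true := by
          simp only [beq_iff_eq]; exact_mod_cast hw
        rw [hbeq]
        simp only [if_true]
        have := ih (M + 1) (m0 + 1)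
        rw [pvMod_succ_full hw] at this
        rw [show ((0:Nat):Int) = (0:Int) from rfl] at this
        rw [this, Prod.mk.injEq]
        refine ⟨rfl, ?_⟩
        push_cast
        ring
      · have hlt : M % c2.length + 1 < c2.length := by omega
        have hbeq : (((M % c2.length : Nat) : Int) + 1 == (c2.length : Int)) = false := by
          simp only [beq_eq_false_iff_ne, ne_eq]
          intro hx
          exact hw (by exact_mod_cast hx)
        rw [hbeq]
        simp only [Bool.false_eq_true, if_false]
        have := ih (M + 1) (m0 + 1)
        rw [pvMod_succ_lt hlt] at this
        rw [show ((M % c2.length + 1 : Nat) : Int) = ((M % c2.length : Nat) : Int) + 1 by push_cast; ring] at this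
        rw [this, Prod.mk.injEq]
        refine ⟨rfl, ?_⟩
        push_cast
        ring
    · simp only [hc, Bool.false_eq_true, if_false]
      exact ih M m0

theorem pvStepB_val (c1 c2 : List Char) (h2 : c2 ≠ []) (M : Nat) :
    pvStepB c1 c2 (c2.length : Int) ((M % c2.length : Nat) : Int)
      = (((pvScan c2 c1 M % c2.length : Nat) : Int), ((pvScan c2 c1 M : Int) - M)) := by
  have := pvStepB_fold c2 h2 c1 M 0
  simpa [pvStepB] using this

theorem pvStepB_u (c1 c2 : List Char) (h2 : c2 ≠ []) (k : Nat) :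
    pvStepB c1 c2 (c2.length : Int) ((pvU c2 c1 k : Nat) : Int)
      = (((pvU c2 c1 (k + 1) : Nat) : Int), ((pvT c2 c1 (k + 1) : Int) - pvT c2 c1 k)) := by
  have h := pvStepB_val c1 c2 h2 (pvT c2 c1 k)
  rw [show pvU c2 c1 k = pvT c2 c1 k % c2.length from rfl]
  rw [h]
  have hT := pvT_succ c2 c1 k
  rw [show pvU c2 c1 (k+1) = pvT c2 c1 (k+1) % c2.length from rfl, hT]

-- ===== A-side =====
theorem pvLoopA_copy (c1 c2 : List Char) (N1 N2 : Nat)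
    (h1 : c1 ≠ []) (h2 : c2 ≠ []) (hN2 : 0 < N2)
    (d : Nat) (hd : d ≤ c1.length) (k M : Nat) (hk : k + 1 ≤ N1) :
    pvLoopA c1 c2 (c1.length : Int) (c2.length : Int) (N1 : Int) (N2 : Int)
      ((k * c1.length + (c1.length - d) : Nat) : Int)
      ((M % (c2.length * N2) : Nat) : Int) ((M / (c2.length * N2) : Nat) : Int)
    = pvLoopA c1 c2 (c1.length : Int) (c2.length : Int) (N1 : Int) (N2 : Int)
      (((k + 1) * c1.length : Nat) : Int)
      ((pvScan c2 (c1.drop (c1.length - d)) M % (c2.length * N2) : Nat) : Int)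
      ((pvScan c2 (c1.drop (c1.length - d)) M / (c2.length * N2) : Nat) : Int) := by
  have hl1 : 0 < c1.length := List.length_pos_of_ne_nil h1
  have hl2 : 0 < c2.length := List.length_pos_of_ne_nil h2
  have hL : 0 < c2.length * N2 := Nat.mul_pos hl2 hN2
  induction d generalizing M with
  | zero =>
    rw [Nat.sub_zero, List.drop_length]
    rw [show k * c1.length + c1.length = (k + 1) * c1.length from (Nat.succ_mul k _).symm]
    rfl
  | succ d ih =>
    set l1 := c1.length with hl1def
    set l2 := c2.length with hl2def
    set L := l2 * N2 with hLdef
    set p := l1 - (d + 1) with hpdef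
    have hp : p < l1 := by omega
    -- the while guard holds
    have hguard : ((k * l1 + p : Nat) : Int) < (l1 : Int) * (N1 : Int) ∧
        ((M % L : Nat) : Int) < (l2 : Int) * (N2 : Int) := by
      constructor
      · have hbound : k * l1 + p < l1 * N1 := by
          have h1' : (k + 1) * l1 ≤ N1 * l1 := Nat.mul_le_mul_right _ hk
          have h2' : (k + 1) * l1 = k * l1 + l1 := Nat.succ_mul k l1
          have h3' := Nat.mul_comm l1 N1
          omega
        exact_mod_cast hbound
      · have : M % L < L := Nat.mod_lt _ hL
        exact_mod_cast this
    rw [pvLoopA, dif_pos hguard]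
    -- the s1 index
    have hmod1 : PySem.Int.mod ((k * l1 + p : Nat) : Int) (l1 : Int) = ((p : Nat) : Int) := by
      rw [PySem.Int.mod_natCast]
      congr 1
      rw [show k * l1 + p = p + l1 * k by ring, Nat.add_mul_mod_self_left, Nat.mod_eq_of_lt hp]
    have hget1 : PySem.List.pyGet? c1 ((p : Nat) : Int) = some c1[p] := by
      rw [PySem.List.pyGet?_natCast, List.getElem?_eq_getElem hp]
    -- the s2 index
    have hmod2 : PySem.Int.mod ((M % L : Nat) : Int) (l2 : Int) = ((M % l2 : Nat) : Int) := by
      rw [PySem.Int.mod_natCast]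
      congr 1
      exact Nat.mod_mod_of_dvd M ⟨N2, rfl⟩
    have hm2 : M % l2 < l2 := Nat.mod_lt _ hl2
    have hget2 : PySem.List.pyGet? c2 ((M % l2 : Nat) : Int) = some c2[M % l2] := by
      rw [PySem.List.pyGet?_natCast, List.getElem?_eq_getElem hm2]
    simp only [hmod1, hget1, hmod2, hget2]
    -- the scan step on the dropped list
    have hdrop : c1.drop p = c1[p] :: c1.drop (p + 1) := List.drop_eq_getElem_cons hp
    have hstep : pvScan c2 (c1.drop p) M =
        pvScan c2 (c1.drop (p + 1)) (if c1[p] == c2[M % l2] then M + 1 else M) := by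
      rw [hdrop, pvScan, List.getD_eq_getElem c2 _ hm2]
    have hcast : ((l2 : Nat) : Int) * ((N2 : Nat) : Int) = ((L : Nat) : Int) := by
      rw [hLdef]; push_cast; ring
    have hnext : ((k * l1 + p : Nat) : Int) + 1 = ((k * l1 + (l1 - d) : Nat) : Int) := by
      push_cast; omega
    have hp1 : p + 1 = l1 - d := by omega
    by_cases hc : c1[p] == c2[M % l2]
    · simp only [hc, if_true] at hstep ⊢
      by_cases hw : M % L + 1 = L
      · have hbeq : (((M % L : Nat) : Int) + 1 == (l2 : Int) * (N2 : Int)) = true := by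
          rw [hcast, beq_iff_eq]; exact_mod_cast hw
        rw [hbeq]
        simp only [if_true]
        rw [hnext]
        have hr := ih (by omega) (M + 1)
        rw [hp1] at hstep
        rw [hstep, ← hr, pvMod_succ_full hw, pvDiv_succ_full hw]
        push_cast
        ring_nf
      · have hlt : M % L + 1 < L := by omega
        have hbeq : (((M % L : Nat) : Int) + 1 == (l2 : Int) * (N2 : Int)) = false := by
          rw [hcast, beq_eq_false_iff_ne, ne_eq]
          intro hx
          exact hw (by exact_mod_cast hx)
        rw [hbeq]
        simp only [Bool.false_eq_true, if_false]
        rw [hnext]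
        have hr := ih (by omega) (M + 1)
        rw [hp1] at hstep
        rw [hstep, ← hr, pvMod_succ_lt hlt, pvDiv_succ_lt hlt]
        push_cast
        ring_nf
    · simp only [hc, Bool.false_eq_true, if_false] at hstep ⊢
      rw [hnext]
      have hr := ih (by omega) M
      rw [hp1] at hstep
      rw [hstep, ← hr]

theorem pvLoopA_main (c1 c2 : List Char) (N1 N2 : Nat)
    (h1 : c1 ≠ []) (h2 : c2 ≠ []) (hN2 : 0 < N2)
    (r : Nat) (hr : r ≤ N1) (M : Nat) :
    pvLoopA c1 c2 (c1.length : Int) (c2.length : Int) (N1 : Int) (N2 : Int)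
      (((N1 - r) * c1.length : Nat) : Int)
      ((M % (c2.length * N2) : Nat) : Int) ((M / (c2.length * N2) : Nat) : Int)
    = ((pvIter c2 c1 r M / (c2.length * N2) : Nat) : Int) := by
  induction r generalizing M with
  | zero =>
    rw [pvLoopA, dif_neg]
    · rfl
    · rintro ⟨hlt, -⟩
      have hc : (((N1 - 0) * c1.length : Nat) : Int) = (c1.length : Int) * (N1 : Int) := by
        rw [Nat.sub_zero]; push_cast; ring
      rw [hc] at hlt
      exact lt_irrefl _ hlt
  | succ r ih =>
    have hk : (N1 - (r + 1)) + 1 ≤ N1 := by omega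
    have hcopy := pvLoopA_copy c1 c2 N1 N2 h1 h2 hN2 c1.length le_rfl (N1 - (r + 1)) M hk
    rw [Nat.sub_self, List.drop_zero] at hcopy
    rw [show N1 - (r + 1) + 1 = N1 - r by omega] at hcopy
    rw [show (N1 - (r + 1)) * c1.length + 0 = (N1 - (r + 1)) * c1.length from Nat.add_zero _] at hcopy
    rw [hcopy, ih (by omega) (pvScan c2 c1 M)]
    rfl

theorem pvLoopA_val (c1 c2 : List Char) (N1 N2 : Nat)
    (h1 : c1 ≠ []) (h2 : c2 ≠ []) (hN2 : 0 < N2) :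
    pvLoopA c1 c2 (c1.length : Int) (c2.length : Int) (N1 : Int) (N2 : Int) 0 0 0
    = ((pvT c2 c1 N1 / (c2.length * N2) : Nat) : Int) := by
  have h := pvLoopA_main c1 c2 N1 N2 h1 h2 hN2 N1 le_rfl 0
  rw [Nat.sub_self, Nat.zero_mul, Nat.zero_mod, Nat.zero_div] at h
  exact_mod_cast h

-- ===== B-side: the while loop =====
theorem pvSeen_contains (c2 c1 : List Char) (k : Nat) (x : Int) :
    (pvSeen c2 c1 k).contains x = true ↔ ∃ i < k, ((pvU c2 c1 i : Nat) : Int) = x := by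
  induction k with
  | zero => simp [pvSeen, PySem.Dict.contains_empty]
  | succ k ih =>
    rw [pvSeen, PySem.Dict.contains_insert, Bool.or_eq_true, beq_iff_eq, ih]
    constructor
    · rintro (h | ⟨i, hi, hx⟩)
      · exact ⟨k, Nat.lt_succ_self k, h.symm⟩
      · exact ⟨i, Nat.lt_succ_of_lt hi, hx⟩
    · rintro ⟨i, hi, hx⟩
      rcases Nat.lt_succ_iff_lt_or_eq.mp hi with h | h
      · exact Or.inr ⟨i, h, hx⟩
      · subst h; exact Or.inl hx.symm

theorem pvSeen_get? (c2 c1 : List Char) (k : Nat)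
    (hinj : ∀ i1 < k, ∀ i2 < k, pvU c2 c1 i1 = pvU c2 c1 i2 → i1 = i2)
    (i0 : Nat) (hi0 : i0 < k) :
    (pvSeen c2 c1 k).get? ((pvU c2 c1 i0 : Nat) : Int)
      = some (((i0 : Nat) : Int), ((pvT c2 c1 i0 : Nat) : Int)) := by
  induction k with
  | zero => omega
  | succ k ih =>
    rw [pvSeen, PySem.Dict.get?_insert]
    by_cases hx : ((pvU c2 c1 i0 : Nat) : Int) = ((pvU c2 c1 k : Nat) : Int)
    · have : i0 = k :=
        hinj i0 hi0 k (Nat.lt_succ_self k) (by exact_mod_cast hx)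
      subst this
      rw [if_pos hx]
    · rw [if_neg hx]
      have hi0k : i0 < k := by
        rcases Nat.lt_succ_iff_lt_or_eq.mp hi0 with h | h
        · exact h
        · exact absurd (by rw [h]) hx
      exact ih (fun i1 h1 i2 h2 he =>
        hinj i1 (Nat.lt_succ_of_lt h1) i2 (Nat.lt_succ_of_lt h2) he) hi0k

theorem pvWalkB_run (c1 c2 : List Char) (h2 : c2 ≠ []) (N1 K : Nat)
    (hKN : K ≤ N1)
    (hstop : K = N1 ∨ ∃ i < K, pvU c2 c1 i = pvU c2 c1 K)
    (hmin : ∀ k < K, k ≠ N1 ∧ ¬ ∃ i < k, pvU c2 c1 i = pvU c2 c1 k)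
    (k : Nat) (hk : k ≤ K) :
    pvWalkB c1 c2 (c2.length : Int) (N1 : Int) (pvSeen c2 c1 k)
      ((pvU c2 c1 k : Nat) : Int) ((pvT c2 c1 k : Nat) : Int) ((k : Nat) : Int)
    = (pvSeen c2 c1 K, ((pvU c2 c1 K : Nat) : Int), ((pvT c2 c1 K : Nat) : Int), ((K : Nat) : Int)) := by
  obtain ⟨n, hn⟩ : ∃ n, K - k = n := ⟨_, rfl⟩
  induction n generalizing k with
  | zero =>
    have hkK : k = K := by omega
    subst hkK
    rw [pvWalkB]
    rw [dif_neg]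
    rintro ⟨hlt, hcf⟩
    rcases hstop with h | ⟨i, hi, he⟩
    · rw [h] at hlt; exact lt_irrefl _ hlt
    · have : (pvSeen c2 c1 k).contains ((pvU c2 c1 k : Nat) : Int) = true :=
        (pvSeen_contains c2 c1 k _).mpr ⟨i, hi, by rw [he]⟩
      rw [this] at hcf
      exact Bool.noConfusion hcf
  | succ n ih =>
    have hkK : k < K := by omega
    have hkN : k < N1 := lt_of_lt_of_le hkK hKN
    have hcf : (pvSeen c2 c1 k).contains ((pvU c2 c1 k : Nat) : Int) = false := by
      rw [← Bool.not_eq_true]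
      intro hc
      obtain ⟨i, hi, he⟩ := (pvSeen_contains c2 c1 k _).mp hc
      exact (hmin k hkK).2 ⟨i, hi, by exact_mod_cast he⟩
    rw [pvWalkB, dif_pos ⟨by exact_mod_cast hkN, hcf⟩]
    have h1 : ((pvT c2 c1 k : Nat) : Int) + (((pvT c2 c1 (k+1) : Nat) : Int) - ((pvT c2 c1 k : Nat) : Int)) = ((pvT c2 c1 (k+1) : Nat) : Int) := by ring
    have h2' : ((k : Nat) : Int) + 1 = (((k+1 : Nat)) : Int) := by push_cast; ring
    simp only [pvStepB_u c1 c2 h2 k, h1, h2']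
    rw [show (pvSeen c2 c1 k).insert ((pvU c2 c1 k : Nat) : Int) (((k : Nat) : Int), ((pvT c2 c1 k : Nat) : Int)) = pvSeen c2 c1 (k+1) from rfl]
    exact ih (k+1) (by omega) (by omega)

-- periodicity of u and of the increments of T along the detected cycle
theorem pvU_cycle (c2 c1 : List Char) (i0 K : Nat) (hi0 : i0 < K)
    (heq : pvU c2 c1 i0 = pvU c2 c1 K) (t : Nat) :
    pvU c2 c1 (K + t * (K - i0)) = pvU c2 c1 K := by
  have hfix : (pvF c2 c1)^[K - i0] (pvU c2 c1 K) = pvU c2 c1 K := by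
    conv_lhs => rw [← heq]
    rw [pvU_iterate, ← Function.iterate_add_apply, pvU_iterate]
    congr 1
    omega
  rw [pvU_iterate, show K + t * (K - i0) = (K - i0) * t + K by ring,
    Function.iterate_add_apply, Function.iterate_mul, ← pvU_iterate]
  exact Function.iterate_fixed hfix t

theorem pvT_shift_sum (c2 c1 : List Char) (b1 b2 : Nat) (heq : pvU c2 c1 b1 = pvU c2 c1 b2)
    (a : Nat) :
    (pvT c2 c1 (b1 + a) : Int) - pvT c2 c1 b1 = (pvT c2 c1 (b2 + a) : Int) - pvT c2 c1 b2 := by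
  induction a with
  | zero => simp
  | succ a ih =>
    have hu : pvU c2 c1 (b1 + a) = pvU c2 c1 (b2 + a) := by
      rw [pvU_iterate, pvU_iterate, show b1 + a = a + b1 by ring, show b2 + a = a + b2 by ring,
        Function.iterate_add_apply, Function.iterate_add_apply, ← pvU_iterate, ← pvU_iterate, heq]
    have h1 := pvT_succ_int c2 c1 (b1 + a)
    have h2 := pvT_succ_int c2 c1 (b2 + a)
    rw [hu] at h1
    rw [show b1 + (a + 1) = (b1 + a) + 1 by ring, show b2 + (a + 1) = (b2 + a) + 1 by ring,
      h1, h2]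
    omega

theorem pvT_cycle (c2 c1 : List Char) (i0 K : Nat) (hi0 : i0 < K)
    (heq : pvU c2 c1 i0 = pvU c2 c1 K) (t : Nat) :
    (pvT c2 c1 (K + t * (K - i0)) : Int)
      = pvT c2 c1 K + t * ((pvT c2 c1 K : Int) - pvT c2 c1 i0) := by
  induction t with
  | zero => simp
  | succ t ih =>
    have hu : pvU c2 c1 (K + t * (K - i0)) = pvU c2 c1 i0 :=
      (pvU_cycle c2 c1 i0 K hi0 heq t).trans heq.symm
    have hs := pvT_shift_sum c2 c1 (K + t * (K - i0)) i0 hu (K - i0)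
    rw [show i0 + (K - i0) = K by omega] at hs
    rw [show K + (t + 1) * (K - i0) = (K + t * (K - i0)) + (K - i0) by ring] at *
    push_cast
    push_cast at ih hs
    linarith

theorem pvTail_fold (c1 c2 : List Char) (h2 : c2 ≠ []) (b r : Nat) :
    (PySem.List.pyRange 0 (r : Int) 1).foldl
      (fun (jt : Int × Int) _ =>
        let sm := pvStepB c1 c2 (c2.length : Int) jt.1
        (sm.1, jt.2 + sm.2))
      (((pvU c2 c1 b : Nat) : Int), ((pvT c2 c1 b : Nat) : Int))
    = (((pvU c2 c1 (b + r) : Nat) : Int), ((pvT c2 c1 (b + r) : Nat) : Int)) := by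
  induction r with
  | zero =>
    rw [show ((0 : Nat) : Int) = 0 from rfl, PySem.List.pyRange_one_eq_nil le_rfl]
    rfl
  | succ r ih =>
    rw [show ((r + 1 : Nat) : Int) = (r : Int) + 1 by push_cast; ring,
      PySem.List.pyRange_one_succ_right (by positivity), List.foldl_append, ih]
    simp only [List.foldl_cons, List.foldl_nil]
    rw [pvStepB_u c1 c2 h2 (b + r)]
    rw [show b + (r + 1) = (b + r) + 1 by ring, Prod.mk.injEq]
    exact ⟨rfl, by push_cast; ring⟩

theorem pvAltCore_val (c1 c2 : List Char) (N1 N2 : Nat)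
    (_h1 : c1 ≠ []) (h2 : c2 ≠ []) (_hN1 : 0 < N1) (_hN2 : 0 < N2) :
    pvAltCore c1 c2 (c2.length : Int) (N1 : Int) (N2 : Int)
    = ((pvT c2 c1 N1 / (c2.length * N2) : Nat) : Int) := by
  have hl2 : 0 < c2.length := List.length_pos_of_ne_nil h2
  have hfd : ((c2.length : Int) * (N2 : Int)) = ((c2.length * N2 : Nat) : Int) := by
    push_cast; ring
  have hex : ∃ k, k = N1 ∨ ∃ i < k, pvU c2 c1 i = pvU c2 c1 k := ⟨N1, Or.inl rfl⟩
  set K := Nat.find hex with hKdef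
  have hPK : K = N1 ∨ ∃ i < K, pvU c2 c1 i = pvU c2 c1 K := Nat.find_spec hex
  have hmin : ∀ k < K, k ≠ N1 ∧ ¬ ∃ i < k, pvU c2 c1 i = pvU c2 c1 k :=
    fun k hk => not_or.mp (Nat.find_min hex hk)
  have hKN : K ≤ N1 := Nat.find_min' hex (Or.inl rfl)
  have hwalk := pvWalkB_run c1 c2 h2 N1 K hKN hPK hmin 0 (Nat.zero_le K)
  have hu0 : ((pvU c2 c1 0 : Nat) : Int) = 0 := by
    rw [show pvU c2 c1 0 = 0 % c2.length from rfl, Nat.zero_mod, Nat.cast_zero]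
  rw [show pvSeen c2 c1 0 = PySem.Dict.empty from rfl, hu0,
    show ((pvT c2 c1 0 : Nat) : Int) = 0 from rfl, Nat.cast_zero] at hwalk
  rw [pvAltCore]
  simp only [hwalk]
  by_cases hKeq : K = N1
  · rw [if_neg (by rw [hKeq]; exact lt_irrefl _), hKeq, hfd, PySem.Int.floordiv_natCast]
  · have hKlt : K < N1 := lt_of_le_of_ne hKN hKeq
    obtain ⟨i0, hi0, heq⟩ : ∃ i < K, pvU c2 c1 i = pvU c2 c1 K := by
      rcases hPK with h | h
      · exact absurd h hKeq
      · exact h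
    have hinj : ∀ i1 < K, ∀ i2 < K, pvU c2 c1 i1 = pvU c2 c1 i2 → i1 = i2 := by
      intro i1 ha i2 hb he
      rcases lt_trichotomy i1 i2 with h | h | h
      · exact absurd ⟨i1, h, he⟩ ((hmin i2 hb).2)
      · exact h
      · exact absurd ⟨i2, h, he.symm⟩ ((hmin i1 ha).2)
    have hgetK : (pvSeen c2 c1 K).get? ((pvU c2 c1 K : Nat) : Int)
        = some (((i0 : Nat) : Int), ((pvT c2 c1 i0 : Nat) : Int)) := by
      rw [show ((pvU c2 c1 K : Nat) : Int) = ((pvU c2 c1 i0 : Nat) : Int) by rw [heq]]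
      exact pvSeen_get? c2 c1 K hinj i0 hi0
    rw [if_pos (by exact_mod_cast hKlt)]
    simp only [hgetK]
    have hc : 0 < K - i0 := by omega
    set Q : Nat := (N1 - K) / (K - i0) with hQdef
    have hQc : Q * (K - i0) ≤ N1 - K := Nat.div_mul_le_self (N1 - K) (K - i0)
    -- cycleLen
    have e1 : ((K : Nat) : Int) - ((i0 : Nat) : Int) = ((K - i0 : Nat) : Int) :=
      (Nat.cast_sub (Nat.le_of_lt hi0)).symm
    -- q
    have e3 : ((N1 : Nat) : Int) - ((K : Nat) : Int) = ((N1 - K : Nat) : Int) :=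
      (Nat.cast_sub hKN).symm
    have e4 : PySem.Int.floordiv ((N1 - K : Nat) : Int) ((K - i0 : Nat) : Int) = ((Q : Nat) : Int) := by
      rw [hQdef]; exact PySem.Int.floordiv_natCast _ _
    -- total after skipping the cycles
    have e5 : ((pvT c2 c1 K : Nat) : Int) + ((Q : Nat) : Int) * (((pvT c2 c1 K : Nat) : Int) - ((pvT c2 c1 i0 : Nat) : Int)) = ((pvT c2 c1 (K + Q * (K - i0)) : Nat) : Int) :=
      (pvT_cycle c2 c1 i0 K hi0 heq Q).symm
    -- counter after skipping the cycles
    have e6 : ((K : Nat) : Int) + ((Q : Nat) : Int) * ((K - i0 : Nat) : Int) = ((K + Q * (K - i0) : Nat) : Int) := by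
      push_cast; ring
    have e7 : ((N1 : Nat) : Int) - ((K + Q * (K - i0) : Nat) : Int) = ((N1 - (K + Q * (K - i0)) : Nat) : Int) :=
      (Nat.cast_sub (by omega)).symm
    have e8 : ((pvU c2 c1 K : Nat) : Int) = ((pvU c2 c1 (K + Q * (K - i0)) : Nat) : Int) := by
      rw [pvU_cycle c2 c1 i0 K hi0 heq Q]
    rw [e1, e3, e4, e5, e6, e7, e8]
    rw [pvTail_fold c1 c2 h2 (K + Q * (K - i0)) (N1 - (K + Q * (K - i0)))]
    rw [show K + Q * (K - i0) + (N1 - (K + Q * (K - i0))) = N1 by omega]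
    rw [hfd, PySem.Int.floordiv_natCast]

-- degenerate cases of A: one of the guards of the while loop is false at entry
theorem pvLoopA_zero (c1 c2 : List Char) (l1 l2 n1 n2 : Int)
    (h : ¬ (0 < l1 * n1 ∧ 0 < l2 * n2)) :
    pvLoopA c1 c2 l1 l2 n1 n2 0 0 0 = 0 := by
  rw [pvLoopA, dif_neg h]

-- ===== VERDICT (by name: the statement is the Claim_ definition above) =====
theorem getMaxRepetitions_bruteforce_spec : Claim_equal_getMaxRepetitions_bruteforce := by
  intro s1 n1 s2 n2 _
  unfold Spec_getMaxRepetitions_bruteforce getMaxRepetitions_bruteforce getMaxRepetitions_bruteforce_alt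
  have hlen1 : PySem.Str.len s1 = (s1.toList.length : Int) := by simp [pysem]
  have hlen2 : PySem.Str.len s2 = (s2.toList.length : Int) := by simp [pysem]
  set p : Int × Int := if n1 == n2 then ((1 : Int), (1 : Int)) else (n1, n2) with hp
  by_cases hdeg : p.1 ≤ 0 ∨ p.2 ≤ 0 ∨ s1.toList = [] ∨ s2.toList = []
  · rw [if_pos hdeg, hlen1, hlen2]
    apply pvLoopA_zero
    rintro ⟨ha, hb⟩
    rcases hdeg with h | h | h | h
    · have h0 : (0 : Int) ≤ (s1.toList.length : Int) := Int.natCast_nonneg _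
      nlinarith
    · have h0 : (0 : Int) ≤ (s2.toList.length : Int) := Int.natCast_nonneg _
      nlinarith
    · rw [h] at ha; simp at ha
    · rw [h] at hb; simp at hb
  · push Not at hdeg
    obtain ⟨hp1, hp2, hs1, hs2⟩ := hdeg
    rw [if_neg (by push Not; exact ⟨hp1, hp2, hs1, hs2⟩)]
    have hN1 : p.1 = ((p.1.toNat : Nat) : Int) := (Int.toNat_of_nonneg hp1.le).symm
    have hN2 : p.2 = ((p.2.toNat : Nat) : Int) := (Int.toNat_of_nonneg hp2.le).symm
    have hn1 : 0 < p.1.toNat := by omega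
    have hn2 : 0 < p.2.toNat := by omega
    show pvLoopA s1.toList s2.toList (PySem.Str.len s1) (PySem.Str.len s2) p.1 p.2 0 0 0
      = pvAltCore s1.toList s2.toList (PySem.Str.len s2) p.1 p.2
    rw [hlen1, hlen2, hN1, hN2]
    rw [pvLoopA_val s1.toList s2.toList p.1.toNat p.2.toNat hs1 hs2 hn2,
      pvAltCore_val s1.toList s2.toList p.1.toNat p.2.toNat hs1 hs2 hn1 hn2]
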